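-- pv_equiv track=rewrite | github.com/nikolaoskoutantos/Building-Efficiency-Tool | api/models/hvac_optimizer.py | _build_operation_schedule
-- ===== SOURCE A (Python) =====
-- from typing import List, Tuple, Dict, Optional, Any
--
-- def _build_operation_schedule(switches: tuple, starting_operation: int,
--                              duration: int) -> List[int]:
--     """
--     Build operation schedule based on switch points and starting operation.
--
--     Args:
--         switches: Tuple of time points where operation switches
--         starting_operation: Initial operation state (0 or 1)
--         duration: Total duration in time steps
--
--     Returns:
--         List of operation states for each time step
--     """
--     operation = []
--     current = starting_operation
--     operation.append(current)
--
--     for i in range(duration):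
--         if i in switches:
--             current ^= 1
--         operation.append(current)
--
--     return operation
-- ===== SOURCE B (Python) =====
-- def _build_operation_schedule(switches: tuple, starting_operation: int,
--                               duration: int):
--     # Segment-fill: iterate once over the sorted effective switch points,
--     # emitting constant runs, instead of testing membership at every timestep.
--     effective = sorted({s for s in switches if 0 <= s < duration})
--     result = [starting_operation]
--     current = starting_operation
--     idx = 1
--     for sw in effective:
--         result.extend([current] * (sw + 1 - idx))
--         idx = sw + 1
--         current ^= 1
--     result.extend([current] * (duration + 1 - idx))
--     return result
-- ===== Notes on version B (the rewrite author's own statement) =====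
-- stated objective: faster
-- what changed: B sorts the deduplicated in-range switch points once and fills constant runs between consecutive switch boundaries, instead of A's per-timestep membership scan of the switches tuple.
import Mathlib
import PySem

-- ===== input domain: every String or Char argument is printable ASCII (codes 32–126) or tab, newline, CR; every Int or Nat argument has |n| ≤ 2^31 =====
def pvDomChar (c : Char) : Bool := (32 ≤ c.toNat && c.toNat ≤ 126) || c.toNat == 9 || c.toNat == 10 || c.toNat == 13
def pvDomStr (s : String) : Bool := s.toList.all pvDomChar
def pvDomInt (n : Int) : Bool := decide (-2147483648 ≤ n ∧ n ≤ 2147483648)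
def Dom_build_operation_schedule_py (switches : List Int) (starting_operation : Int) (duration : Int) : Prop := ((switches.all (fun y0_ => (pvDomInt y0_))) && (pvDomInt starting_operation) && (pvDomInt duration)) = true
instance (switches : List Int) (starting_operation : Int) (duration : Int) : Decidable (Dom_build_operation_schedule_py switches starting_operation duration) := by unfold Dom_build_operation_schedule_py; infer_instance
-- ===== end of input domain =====

-- B replaces A's per-timestep membership scan by one pass over the sorted
-- distinct in-range switch points, filling constant runs between boundaries.

-- Python's `n ^ 1` on an int: flips the lowest bit (exact for all Ints).
def pyXor1 (n : Int) : Int := if n % 2 = 0 then n + 1 else n - 1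

-- ===== PORT A =====
def build_operation_schedule_py (switches : List Int) (starting_operation : Int) (duration : Int) : List Int :=
  let r := (PySem.List.pyRange 0 duration 1).foldl
    (fun (p : List Int × Int) i =>
      let cur := if i ∈ switches then pyXor1 p.2 else p.2
      (p.1 ++ [cur], cur))
    ([starting_operation], starting_operation)
  r.1

-- ===== PORT B =====
def build_operation_schedule_py_alt (switches : List Int) (starting_operation : Int) (duration : Int) : List Int :=
  let effective := PySem.List.sorted
    (PySem.Set.ofList (switches.filter (fun s => 0 ≤ s && s < duration)))
    (fun x => x) false
  let r := effective.foldl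
    (fun (p : List Int × Int × Int) sw =>
      (p.1 ++ List.replicate (sw + 1 - p.2.1).toNat p.2.2, sw + 1, pyXor1 p.2.2))
    ([starting_operation], 1, starting_operation)
  r.1 ++ List.replicate (duration + 1 - r.2.1).toNat r.2.2

-- ===== PRECONDITION & SPEC =====
def Spec_build_operation_schedule_py (switches : List Int) (starting_operation : Int) (duration : Int) (out : List Int) : Prop := out = build_operation_schedule_py_alt switches starting_operation duration
instance (switches : List Int) (starting_operation : Int) (duration : Int) (out : List Int) : Decidable (Spec_build_operation_schedule_py switches starting_operation duration out) := by unfold Spec_build_operation_schedule_py; infer_instance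

-- ===== CLAIM (what is proved, stated in full; the proofs are below) =====
def Claim_equal_build_operation_schedule_py : Prop := ∀ (switches : List Int) (starting_operation : Int) (duration : Int), Dom_build_operation_schedule_py switches starting_operation duration → Spec_build_operation_schedule_py switches starting_operation duration (build_operation_schedule_py switches starting_operation duration)

-- ===== LEMMAS AND PROOFS =====

-- the states produced by A's loop over steps i, i+1, …, i+n-1 (and the final state)
def runA (sw : List Int) : Int → Int → Nat → (List Int × Int)
  | cur, _, 0 => ([], cur)
  | cur, i, n+1 =>
    let c := if i ∈ sw then pyXor1 cur else cur
    let r := runA sw c (i+1) n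
    (c :: r.1, r.2)

-- segment filling: outputs idx, idx+1, … (n of them), toggling after each boundary in e
def fill : List Int → Int → Int → Nat → List Int
  | [], cur, _, n => List.replicate n cur
  | s :: rest, cur, idx, n =>
    List.replicate (s + 1 - idx).toNat cur ++
      fill rest (pyXor1 cur) (s + 1) (n - (s + 1 - idx).toNat)

theorem fill_peel (e : List Int) (cur idx : Int) (m : Nat)
    (h : ∀ x ∈ e, idx ≤ x) :
    fill e cur idx (m+1) = cur :: fill e cur (idx+1) m := by
  cases e with
  | nil => simp [fill, List.replicate_succ]
  | cons s rest =>
    have hs : idx ≤ s := h s (by simp)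
    have h1 : (s + 1 - idx).toNat = (s + 1 - (idx+1)).toNat + 1 := by omega
    have h2 : (m + 1) - (s + 1 - idx).toNat = m - (s + 1 - (idx+1)).toNat := by omega
    simp [fill, h1, List.replicate_succ]

theorem foldA (sw : List Int) : ∀ (n : Nat) (acc : List Int) (cur i : Int),
    (PySem.List.pyRange i (i + n) 1).foldl
      (fun (p : List Int × Int) j =>
        let c := if j ∈ sw then pyXor1 p.2 else p.2
        (p.1 ++ [c], c)) (acc, cur)
    = (acc ++ (runA sw cur i n).1, (runA sw cur i n).2) := by
  intro n
  induction n with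
  | zero => intro acc cur i; simp [PySem.List.pyRange_one_eq_nil, runA]
  | succ n ih =>
    intro acc cur i
    have hlt : i < i + ((n : Int) + 1) := by omega
    have hsplit : PySem.List.pyRange i (i + ((n:Int)+1)) 1
        = i :: PySem.List.pyRange (i+1) ((i+1) + (n:Int)) 1 := by
      rw [PySem.List.pyRange_one_cons hlt]; ring_nf
    push_cast
    rw [hsplit]
    simp only [List.foldl_cons]
    rw [ih]
    simp [runA]

theorem runA_eq_fill (sw : List Int) : ∀ (n : Nat) (e : List Int) (cur i : Int),
    e.Pairwise (· < ·) →
    (∀ x ∈ e, i ≤ x ∧ x < i + (n : Int)) →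
    (∀ j : Int, i ≤ j → j < i + (n : Int) → (j ∈ sw ↔ j ∈ e)) →
    (runA sw cur i n).1 = fill e cur (i+1) n := by
  intro n
  induction n with
  | zero =>
    intro e cur i _ h2 _
    cases e with
    | nil => simp [runA, fill]
    | cons s rest => have := h2 s (by simp); omega
  | succ n ih =>
    intro e cur i h1 h2 h3
    by_cases hmem : i ∈ sw
    · have hie : i ∈ e := (h3 i le_rfl (by omega)).mp hmem
      cases e with
      | nil => simp at hie
      | cons s rest =>
        have hsi : s = i := by
          rcases List.mem_cons.mp hie with h | h
          · omega
          · have := (List.pairwise_cons.mp h1).1 i h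
            have := (h2 s (by simp)).1
            omega
        subst hsi
        have hrest : ∀ x ∈ rest, s < x := (List.pairwise_cons.mp h1).1
        have hfill : fill (s :: rest) cur (s+1) (n+1)
            = fill rest (pyXor1 cur) (s+1) (n+1) := by
          simp [fill]
        rw [show (runA sw cur s (n+1)).1
              = (if s ∈ sw then pyXor1 cur else cur)
                :: (runA sw (if s ∈ sw then pyXor1 cur else cur) (s+1) n).1 from rfl,
            if_pos hmem, hfill,
            fill_peel rest (pyXor1 cur) (s+1) n (fun x hx => by have := hrest x hx; omega)]
        congr 1
        exact ih rest (pyXor1 cur) (s+1) (List.pairwise_cons.mp h1).2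
          (fun x hx => by have := hrest x hx; have := (h2 x (by simp [hx])).2; push_cast at *; omega)
          (fun j hj1 hj2 => by
            rw [h3 j (by omega) (by push_cast at *; omega)]
            simp only [List.mem_cons]
            constructor
            · rintro (h | h); · omega
              · exact h
            · intro h; right; exact h)
    · have hie : i ∉ e := fun h => hmem ((h3 i le_rfl (by omega)).mpr h)
      rw [show (runA sw cur i (n+1)).1
            = (if i ∈ sw then pyXor1 cur else cur)
              :: (runA sw (if i ∈ sw then pyXor1 cur else cur) (i+1) n).1 from rfl,
          if_neg hmem,
          fill_peel e cur (i+1) n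
            (fun x hx => by
              have := (h2 x hx).1
              have : x ≠ i := fun h => hie (h ▸ hx)
              omega)]
      congr 1
      exact ih e cur (i+1) h1
        (fun x hx => by
          have h := h2 x hx
          have : x ≠ i := fun hh => hie (hh ▸ hx)
          push_cast at *; omega)
        (fun j hj1 hj2 => h3 j (by omega) (by push_cast at *; omega))

theorem foldB (d : Int) : ∀ (e : List Int) (acc : List Int) (idx cur : Int),
    e.Pairwise (· < ·) →
    (∀ x ∈ e, idx ≤ x + 1 ∧ x < d) →
    (let r := e.foldl
        (fun (p : List Int × Int × Int) s =>
          (p.1 ++ List.replicate (s + 1 - p.2.1).toNat p.2.2, s + 1, pyXor1 p.2.2))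
        (acc, idx, cur)
     r.1 ++ List.replicate (d + 1 - r.2.1).toNat r.2.2)
    = acc ++ fill e cur idx (d + 1 - idx).toNat := by
  intro e
  induction e with
  | nil => intro acc idx cur _ _; simp [fill]
  | cons s rest ih =>
    intro acc idx cur h1 h2
    have hs1 : idx ≤ s + 1 := (h2 s (by simp)).1
    have hsd : s < d := (h2 s (by simp)).2
    simp only [List.foldl_cons]
    rw [ih (acc ++ List.replicate (s + 1 - idx).toNat cur) (s+1) (pyXor1 cur)
          (List.pairwise_cons.mp h1).2
          (fun x hx => ⟨by have := (List.pairwise_cons.mp h1).1 x hx; omega,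
                        (h2 x (by simp [hx])).2⟩)]
    have hbud : (d + 1 - idx).toNat - (s + 1 - idx).toNat = (d + 1 - (s+1)).toNat := by omega
    simp [fill, hbud, List.append_assoc]

theorem eff_spec (switches : List Int) (duration : Int) :
    (PySem.List.sorted (PySem.Set.ofList (switches.filter (fun s => 0 ≤ s && s < duration))) (fun x => x) false).Pairwise (· < ·)
    ∧ (∀ x : Int, x ∈ PySem.List.sorted (PySem.Set.ofList (switches.filter (fun s => 0 ≤ s && s < duration))) (fun x => x) false
        ↔ (x ∈ switches ∧ 0 ≤ x ∧ x < duration)) := by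
  constructor
  · exact PySem.List.sorted_ofList_pairwise_lt _
  · intro x
    rw [PySem.List.mem_sorted, PySem.Set.mem_ofList, List.mem_filter]
    simp

-- ===== VERDICT (by name: the statement is the Claim_ definition above) =====
theorem build_operation_schedule_py_spec : Claim_equal_build_operation_schedule_py := by
  intro switches st d _
  unfold Spec_build_operation_schedule_py build_operation_schedule_py build_operation_schedule_py_alt
  obtain ⟨hpw, hmem⟩ := eff_spec switches d
  set e := PySem.List.sorted (PySem.Set.ofList (switches.filter (fun s => 0 ≤ s && s < d))) (fun x => x) false with he
  rw [foldB d e [st] 1 st hpw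
        (fun x hx => by have := (hmem x).mp hx; omega)]
  by_cases hd : 0 ≤ d
  · have hd' : d = ((d.toNat : Int)) := by omega
    have hA : PySem.List.pyRange 0 d 1 = PySem.List.pyRange 0 (0 + (d.toNat : Int)) 1 := by
      rw [← hd']; norm_num
    rw [hA, foldA switches d.toNat [st] st 0]
    simp only []
    rw [runA_eq_fill switches d.toNat e st 0 hpw
          (fun x hx => by have := (hmem x).mp hx; omega)
          (fun j hj1 hj2 => by rw [hmem j]; constructor
                               · intro h; exact ⟨h, hj1, by omega⟩
                               · intro h; exact h.1)]
    simp
  · have hA : PySem.List.pyRange 0 d 1 = [] := PySem.List.pyRange_one_eq_nil (by omega)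
    have heq : e = [] := by
      cases hE : e with
      | nil => rfl
      | cons a t =>
        have := (hmem a).mp (by rw [hE]; simp)
        omega
    rw [hA, heq]
    simp [fill]
    omega
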